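-- pv_equiv track=rewrite | github.com/iCarrrot/SI | lab1/z4.py | opt_dist
-- ===== SOURCE A (Python) =====
-- def opt_dist(row, size):
--     suma = sum(row)
--     change = len(row)
--     index = -1
--     for i in range(len(row)-size+1):
--         wind = row[i:i+size]
--         _change = size - 2*sum(wind) + suma
--         if _change < change:
--             index = i
--             change = _change
--
--     res = [0 for x in range(len(row))]
--     res[index:index+size] = [1 for x in range(size)]
--     return(res, change)
-- ===== SOURCE B (Python) =====
-- def opt_dist(row, size):
--     # Prefix-sum approach: build the running prefix sums once, read every
--     # window sum as a difference of two prefixes, and scan the cost of each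
--     # window by pairing each prefix with the prefix `size` places later.
--     n = len(row)
--     prefix = [0]
--     acc = 0
--     for x in row:
--         acc += x
--         prefix.append(acc)
--     total = prefix[n]
--     best_i, best = -1, n
--     for i, (p, q) in enumerate(zip(prefix, prefix[size:])):
--         c = size - 2 * (q - p) + total
--         if c < best:
--             best_i, best = i, c
--     res = [0] * n
--     res[best_i:best_i + size] = [1] * size
--     return res, best
-- ===== Notes on version B (the rewrite author's own statement) =====
-- stated objective: faster
-- what changed: B builds the prefix-sum list once and scans window costs as differences of two prefixes (zipping the prefix list with itself shifted by size), instead of A's re-slicing and re-summing of each window.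
-- outside the precondition, e.g. on opt_dist([1, 2], -1): A returns ([0], 0), B returns ([0], -4)
import Mathlib
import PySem

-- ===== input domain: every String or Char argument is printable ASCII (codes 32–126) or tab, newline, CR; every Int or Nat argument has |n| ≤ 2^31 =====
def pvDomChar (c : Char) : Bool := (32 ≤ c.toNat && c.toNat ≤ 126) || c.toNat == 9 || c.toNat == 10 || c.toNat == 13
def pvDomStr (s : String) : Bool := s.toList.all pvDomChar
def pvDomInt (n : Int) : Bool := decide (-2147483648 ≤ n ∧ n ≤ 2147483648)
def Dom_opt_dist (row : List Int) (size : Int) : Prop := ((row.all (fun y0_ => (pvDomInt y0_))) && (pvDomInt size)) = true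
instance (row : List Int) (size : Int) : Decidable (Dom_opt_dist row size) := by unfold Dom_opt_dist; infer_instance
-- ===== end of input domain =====

-- B builds the prefix-sum list once and reads every window sum as a
-- difference of two prefixes (pairing each prefix with the one `size` places
-- later), instead of A's per-position slice-and-resum (objective: faster).

-- ===== PORT A =====
def opt_dist (row : List Int) (size : Int) : List Int × Int :=
  let suma := row.sum
  let st :=
    (PySem.List.pyRange 0 ((row.length : Int) - size + 1)).foldl
      (fun (st : Int × Int) (i : Int) =>
        let wind := PySem.List.slice row (some i) (some (i + size))
        let c := size - 2 * wind.sum + suma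
        if c < st.2 then (i, c) else st)
      (-1, (row.length : Int))
  let res : List Int := (PySem.List.pyRange 0 (row.length : Int)).map (fun _ => 0)
  let ones : List Int := (PySem.List.pyRange 0 size).map (fun _ => 1)
  -- res[index:index+size] = ones — Python slice assignment, exact:
  -- res[:s] + ones + res[max s t:] with s, t the clamped slice bounds.
  let s := PySem.List.clampIdx res.length st.1
  let t := max s (PySem.List.clampIdx res.length (st.1 + size))
  (res.take s ++ ones ++ res.drop t, st.2)

-- ===== PORT B =====
-- Python slice assignment xs[i:i+m] = v, exact (clamped bounds, insertion).
def pvSplice (xs : List Int) (i m : Int) (v : List Int) : List Int :=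
  let a := PySem.List.clampIdx xs.length i
  let b := max a (PySem.List.clampIdx xs.length (i + m))
  xs.take a ++ v ++ xs.drop b

def opt_dist_alt (row : List Int) (size : Int) : List Int × Int :=
  let n : Int := (row.length : Int)
  -- prefix = [0]; for x in row: acc += x; prefix.append(acc)
  let pr := (row.foldl
      (fun (st : List Int × Int) x => (st.1 ++ [st.2 + x], st.2 + x)) ([0], 0)).1
  let total := PySem.List.pyGetD pr n 0   -- prefix[n]; always in range: len(prefix) = n+1
  -- for i, (p, q) in enumerate(zip(prefix, prefix[size:])): …
  let st := (PySem.List.enumerate (pr.zip (PySem.List.slice pr (some size) none))).foldl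
      (fun (st : Int × Int) (ipq : Int × Int × Int) =>
        let c := size - 2 * (ipq.2.2 - ipq.2.1) + total
        if c < st.2 then (ipq.1, c) else st)
      (-1, n)
  (pvSplice (PySem.List.pyRepeat [0] n) st.1 size (PySem.List.pyRepeat [1] size), st.2)

-- ===== PRECONDITION & SPEC =====
-- Pre_ excludes size < 0, where A's "windows" row[i:i+size] are accidental
-- empty wrapped slices and its final assignment can delete elements, while
-- B's prefix[size:] pairing walks different windows: the corner is anybody's.
def Pre_opt_dist (row : List Int) (size : Int) : Prop := 0 ≤ size
instance (row : List Int) (size : Int) : Decidable (Pre_opt_dist row size) := by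
  unfold Pre_opt_dist; infer_instance

def pvWitness_opt_dist : List Int × Int := ([0, 1, 0], 2)

def Spec_opt_dist (row : List Int) (size : Int) (out : List Int × Int) : Prop :=
  out = opt_dist_alt row size
instance (row : List Int) (size : Int) (out : List Int × Int) : Decidable (Spec_opt_dist row size out) := by
  unfold Spec_opt_dist; infer_instance

-- ===== CLAIM (what is proved, stated in full; the proofs are below) =====
def Claim_equal_opt_dist : Prop := ∀ (row : List Int) (size : Int), Dom_opt_dist row size → Pre_opt_dist row size → Spec_opt_dist row size (opt_dist row size)

-- ===== LEMMAS AND PROOFS =====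

-- prefix sum of the first k elements
def pvP (row : List Int) (k : Nat) : Int := (row.take k).sum

-- A's loop body
def pvF (row : List Int) (size : Int) (st : Int × Int) (i : Int) : Int × Int :=
  let c := size - 2 * (PySem.List.slice row (some i) (some (i + size))).sum + row.sum
  if c < st.2 then (i, c) else st

-- B's prefix-building fold, characterised
theorem pvPrefix_fold (xs : List Int) : ∀ (pr : List Int) (a : Int),
    xs.foldl (fun (st : List Int × Int) x => (st.1 ++ [st.2 + x], st.2 + x)) (pr, a)
      = (pr ++ (List.range xs.length).map (fun k => a + pvP xs (k + 1)), a + xs.sum) := by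
  induction xs with
  | nil => intro pr a; simp
  | cons x xs ih =>
    intro pr a
    simp only [List.foldl_cons, ih (pr ++ [a + x]) (a + x), List.length_cons,
      List.range_succ_eq_map, List.map_cons, List.map_map, List.sum_cons,
      Prod.mk.injEq]
    constructor
    · rw [List.append_assoc]
      congr 1
      simp only [List.singleton_append, pvP, List.take_succ_cons, List.sum_cons,
        List.take_zero, List.sum_nil]
      congr 1
      · ring
      · apply List.map_congr_left
        intro k _
        simp only [Function.comp_apply, Nat.succ_eq_add_one]
        ring
    · ring

theorem pvPrefix_eq (row : List Int) :
    (row.foldl (fun (st : List Int × Int) x => (st.1 ++ [st.2 + x], st.2 + x)) ([0], 0)).1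
      = (List.range (row.length + 1)).map (pvP row) := by
  rw [pvPrefix_fold row [0] 0, List.range_succ_eq_map]
  simp only [List.map_cons, List.map_map, List.cons_append, List.nil_append]
  have h0 : pvP row 0 = 0 := by simp [pvP]
  rw [h0]
  simp [Function.comp, Nat.succ_eq_add_one]

theorem pv_enumerate_map_range {α : Type} :
    ∀ (K : Nat) (h : Nat → α) (s : Int), PySem.List.enumerate ((List.range K).map h) s
      = (List.range K).map (fun (j : Nat) => (s + (j : Int), h j)) := by
  intro K
  induction K with
  | zero => intro h s; simp
  | succ K ih =>
    intro h s
    rw [List.range_succ_eq_map]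
    simp only [List.map_cons, List.map_map, PySem.List.enumerate_cons,
      ih (h ∘ Nat.succ) (s + 1)]
    congr 1
    · simp
    · apply List.map_congr_left
      intro k _
      simp only [Function.comp_apply, Nat.succ_eq_add_one, Prod.mk.injEq]
      refine ⟨by push_cast; ring, by trivial⟩

theorem pv_drop_range (n m : Nat) :
    (List.range n).drop m = (List.range (n - m)).map (m + ·) := by
  apply List.ext_getElem <;> simp

theorem pv_zip_map_range {α : Type} (f g : Nat → α) (N K : Nat) (hK : K ≤ N) :
    ((List.range N).map f).zip ((List.range K).map g)
      = (List.range K).map (fun j => (f j, g j)) := by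
  apply List.ext_getElem
  · simp; omega
  · intro i h1 h2
    simp [List.getElem_zip]

-- window sum as a prefix difference (unconditional)
theorem pv_window_eq (row : List Int) (sz j : Nat) :
    pvP row (sz + j) - pvP row j = ((row.drop j).take sz).sum := by
  unfold pvP
  rw [Nat.add_comm sz j, List.take_add, List.sum_append]
  ring

theorem pv_zeros_eq (row : List Int) :
    (PySem.List.pyRange 0 (row.length : Int)).map (fun _ => (0 : Int))
      = List.replicate row.length 0 := by
  rw [PySem.List.pyRange_zero_natCast]
  simp [List.map_map, Function.comp, List.eq_replicate_iff, List.mem_map]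

theorem pv_ones_eq (size : Int) (hs : 0 ≤ size) :
    (PySem.List.pyRange 0 size).map (fun _ => (1 : Int)) = List.replicate size.toNat 1 := by
  have : size = ((size.toNat : Nat) : Int) := by omega
  rw [this, PySem.List.pyRange_zero_natCast]
  simp [List.map_map, Function.comp, List.eq_replicate_iff, List.mem_map]
  omega

-- the two loops compute the same (index, change) pair
theorem pv_folds_eq (row : List Int) (size : Int) (hs : 0 ≤ size) :
    (PySem.List.enumerate
        (((row.foldl (fun (st : List Int × Int) x => (st.1 ++ [st.2 + x], st.2 + x)) ([0], 0)).1).zip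
          (PySem.List.slice
            ((row.foldl (fun (st : List Int × Int) x => (st.1 ++ [st.2 + x], st.2 + x)) ([0], 0)).1)
            (some size) none))).foldl
      (fun (st : Int × Int) (ipq : Int × Int × Int) =>
        let c := size - 2 * (ipq.2.2 - ipq.2.1)
          + PySem.List.pyGetD
              ((row.foldl (fun (st : List Int × Int) x => (st.1 ++ [st.2 + x], st.2 + x)) ([0], 0)).1)
              ((row.length : Int)) 0
        if c < st.2 then (ipq.1, c) else st)
      (-1, (row.length : Int))
    = (PySem.List.pyRange 0 ((row.length : Int) - size + 1)).foldl (pvF row size)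
        (-1, (row.length : Int)) := by
  have hsz : size = ((size.toNat : Nat) : Int) := by omega
  rw [hsz]
  generalize size.toNat = sz
  rw [pvPrefix_eq]
  -- total = prefix[n] = sum(row)
  have htot : PySem.List.pyGetD ((List.range (row.length + 1)).map (pvP row)) ((row.length : Int)) 0
      = row.sum := by
    rw [PySem.List.pyGetD_natCast,
      PySem.List.getD_map_range (pvP row) (row.length + 1) row.length 0 (by omega)]
    simp [pvP]
  rw [htot]
  -- prefix[size:] = drop sz, as a map over a shifted range
  rw [PySem.List.slice_from_natCast, ← List.map_drop, pv_drop_range, List.map_map]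
  -- zip and enumerate collapse to one map over range, then fold over the map
  rw [pv_zip_map_range (pvP row) (pvP row ∘ (fun x => sz + x)) (row.length + 1)
        (row.length + 1 - sz) (by omega),
      pv_enumerate_map_range, List.foldl_map]
  -- A's range as List.range
  rw [PySem.List.pyRange_one, List.foldl_map]
  have hlen : (((row.length : Int) - ((sz : Nat) : Int) + 1) - 0).toNat = row.length + 1 - sz := by
    omega
  rw [hlen]
  apply PySem.List.foldl_congr_mem
  intro acc j _
  simp only [pvF, Function.comp_apply, zero_add, PySem.List.slice_natCast_add]
  rw [pv_window_eq row sz j]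

-- A's and B's results as functions of their loop states (definitional)
theorem pvA_char (row : List Int) (size : Int) :
    opt_dist row size
      = (((PySem.List.pyRange 0 (row.length : Int)).map (fun _ => (0 : Int))).take
          (PySem.List.clampIdx ((PySem.List.pyRange 0 (row.length : Int)).map (fun _ => (0 : Int))).length
            ((PySem.List.pyRange 0 ((row.length : Int) - size + 1)).foldl (pvF row size)
              (-1, (row.length : Int))).1)
        ++ (PySem.List.pyRange 0 size).map (fun _ => (1 : Int))
        ++ ((PySem.List.pyRange 0 (row.length : Int)).map (fun _ => (0 : Int))).drop
            (max (PySem.List.clampIdx ((PySem.List.pyRange 0 (row.length : Int)).map (fun _ => (0 : Int))).length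
                   ((PySem.List.pyRange 0 ((row.length : Int) - size + 1)).foldl (pvF row size)
                     (-1, (row.length : Int))).1)
                 (PySem.List.clampIdx ((PySem.List.pyRange 0 (row.length : Int)).map (fun _ => (0 : Int))).length
                   (((PySem.List.pyRange 0 ((row.length : Int) - size + 1)).foldl (pvF row size)
                     (-1, (row.length : Int))).1 + size))),
       ((PySem.List.pyRange 0 ((row.length : Int) - size + 1)).foldl (pvF row size)
         (-1, (row.length : Int))).2) := rfl

theorem pvB_char (row : List Int) (size : Int) :
    opt_dist_alt row size
      = (pvSplice (PySem.List.pyRepeat [0] (row.length : Int))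
          ((PySem.List.enumerate
              (((row.foldl (fun (st : List Int × Int) x => (st.1 ++ [st.2 + x], st.2 + x)) ([0], 0)).1).zip
                (PySem.List.slice
                  ((row.foldl (fun (st : List Int × Int) x => (st.1 ++ [st.2 + x], st.2 + x)) ([0], 0)).1)
                  (some size) none))).foldl
            (fun (st : Int × Int) (ipq : Int × Int × Int) =>
              let c := size - 2 * (ipq.2.2 - ipq.2.1)
                + PySem.List.pyGetD
                    ((row.foldl (fun (st : List Int × Int) x => (st.1 ++ [st.2 + x], st.2 + x)) ([0], 0)).1)
                    ((row.length : Int)) 0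
              if c < st.2 then (ipq.1, c) else st)
            (-1, (row.length : Int))).1 size (PySem.List.pyRepeat [1] size),
         ((PySem.List.enumerate
              (((row.foldl (fun (st : List Int × Int) x => (st.1 ++ [st.2 + x], st.2 + x)) ([0], 0)).1).zip
                (PySem.List.slice
                  ((row.foldl (fun (st : List Int × Int) x => (st.1 ++ [st.2 + x], st.2 + x)) ([0], 0)).1)
                  (some size) none))).foldl
            (fun (st : Int × Int) (ipq : Int × Int × Int) =>
              let c := size - 2 * (ipq.2.2 - ipq.2.1)
                + PySem.List.pyGetD
                    ((row.foldl (fun (st : List Int × Int) x => (st.1 ++ [st.2 + x], st.2 + x)) ([0], 0)).1)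
                    ((row.length : Int)) 0
              if c < st.2 then (ipq.1, c) else st)
            (-1, (row.length : Int))).2) := rfl

-- the two result assemblies agree on equal loop states
theorem pv_assemble_eq (row : List Int) (size : Int) (hs : 0 ≤ size) (st : Int × Int) :
    (((PySem.List.pyRange 0 (row.length : Int)).map (fun _ => (0 : Int))).take
        (PySem.List.clampIdx ((PySem.List.pyRange 0 (row.length : Int)).map (fun _ => (0 : Int))).length st.1)
      ++ (PySem.List.pyRange 0 size).map (fun _ => (1 : Int))
      ++ ((PySem.List.pyRange 0 (row.length : Int)).map (fun _ => (0 : Int))).drop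
          (max (PySem.List.clampIdx ((PySem.List.pyRange 0 (row.length : Int)).map (fun _ => (0 : Int))).length st.1)
               (PySem.List.clampIdx ((PySem.List.pyRange 0 (row.length : Int)).map (fun _ => (0 : Int))).length (st.1 + size))),
     st.2)
    = (pvSplice (PySem.List.pyRepeat [0] (row.length : Int)) st.1 size
        (PySem.List.pyRepeat [1] size), st.2) := by
  unfold pvSplice
  rw [pv_zeros_eq, pv_ones_eq size hs,
      PySem.List.pyRepeat_singleton, PySem.List.pyRepeat_singleton]
  have : ((row.length : Int)).toNat = row.length := by omega
  rw [this]

-- ===== VERDICT (by name: the statement is the Claim_ definition above) =====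
theorem opt_dist_spec : Claim_equal_opt_dist := by
  intro row size _hdom hpre
  show opt_dist row size = opt_dist_alt row size
  rw [pvA_char, pvB_char, pv_folds_eq row size hpre]
  exact pv_assemble_eq row size hpre _
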